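-- pv_equiv track=rewrite | github.com/Forescout/eyeExtend-Connect | Oracle KVM/oracle-kvm-1-0-8/oraclekvm_lib.py | parse_host_mac_and_ip
-- ===== SOURCE A (Python) =====
-- def normalize_mac(raw_mac):
--     """Convert any MAC format to Forescout's 12-char uppercase hex.
--
--     Forescout requires MAC as '001122334455' — no colons, dashes, or dots.
--     """
--     if not raw_mac:
--         return None
--     return raw_mac.replace(":", "").replace("-", "").replace(".", "").upper()
--
-- def parse_host_mac_and_ip(nics):
--     """Extract the management MAC and IP from the host NIC list.
--
--     Returns (mac, ip).
--     """
--     mac = None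
--     ip_address = None
--
--     for nic in nics:
--         nic_ip_block = nic.get("ip", {})
--         nic_ip = nic_ip_block.get("address", "") if nic_ip_block else ""
--         nic_mac = nic.get("mac", {}).get("address", "")
--
--         if nic_ip and not nic_ip.startswith("127."):
--             ip_address = nic_ip
--             if nic_mac:
--                 mac = normalize_mac(nic_mac)
--             break
--         elif nic_mac and not mac:
--             mac = normalize_mac(nic_mac)
--
--     return mac, ip_address
-- ===== SOURCE B (Python) =====
-- def _norm(raw):
--     return raw.replace(":", "").replace("-", "").replace(".", "").upper()
--
-- def _nic_ip(nic):
--     blk = nic.get("ip", {})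
--     return blk.get("address", "") if blk else ""
--
-- def _nic_mac(nic):
--     return nic.get("mac", {}).get("address", "")
--
-- def parse_host_mac_and_ip(nics):
--     """Locate the management NIC first, then derive the MAC and IP from it."""
--     idx = next((i for i, nic in enumerate(nics)
--                 if _nic_ip(nic) and not _nic_ip(nic).startswith("127.")), None)
--     ip_address = _nic_ip(nics[idx]) if idx is not None else None
--     if idx is not None and _nic_mac(nics[idx]):
--         return _norm(_nic_mac(nics[idx])), ip_address
--     candidates = nics if idx is None else nics[:idx]
--     mac = next((n for n in (_norm(_nic_mac(nic)) for nic in candidates) if n), None)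
--     return mac, ip_address
-- ===== Notes on version B (the rewrite author's own statement) =====
-- stated objective: alternative
-- what changed: A's single accumulator loop with an early break is replaced by a locate-then-derive decomposition: first find the index of the management NIC (first truthy non-127. IP), then derive the IP from it and the MAC either from that NIC or as the first non-empty normalized MAC among the NICs before it.
-- intended difference: On inputs where the MAC must come from the fallback NICs and every candidate MAC address there is either empty or consists only of the separator characters ':','-','.', A returns the empty string '' as the MAC (an artefact of its falsy accumulator), while B returns None, the intended 'no MAC found'. — e.g. on parse_host_mac_and_ip([[("mac", [("address", ":")])]]): A returns (some "", none), B returns (none, none)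
import Mathlib
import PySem

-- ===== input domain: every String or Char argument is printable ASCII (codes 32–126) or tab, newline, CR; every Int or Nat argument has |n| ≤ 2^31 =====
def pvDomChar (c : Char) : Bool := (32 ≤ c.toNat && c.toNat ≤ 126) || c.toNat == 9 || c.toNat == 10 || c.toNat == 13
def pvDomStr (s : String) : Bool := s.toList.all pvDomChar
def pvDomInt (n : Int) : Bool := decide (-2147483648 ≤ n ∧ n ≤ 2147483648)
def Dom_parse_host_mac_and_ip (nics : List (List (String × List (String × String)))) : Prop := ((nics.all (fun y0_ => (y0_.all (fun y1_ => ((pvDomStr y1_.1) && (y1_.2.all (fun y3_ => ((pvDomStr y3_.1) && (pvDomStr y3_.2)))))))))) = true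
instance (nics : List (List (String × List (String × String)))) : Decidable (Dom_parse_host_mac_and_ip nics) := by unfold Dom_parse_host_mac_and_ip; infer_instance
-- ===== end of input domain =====

-- B restructures A's single accumulator loop into locate-the-management-NIC first, then derive IP and MAC (alternative decomposition, no speed claim); on the degenerate corner where every fallback MAC is only separator characters A returns "" and B returns None (see D_).

-- ===== PORT A =====
-- shared helpers: the '.replace…upper()' normalisation body and the two dict lookups both Pythons perform
def pvNorm (raw : String) : String :=
  PySem.Str.upper (PySem.Str.replace (PySem.Str.replace (PySem.Str.replace raw ":" "") "-" "") "." "")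

-- normalize_mac of A (returns None on falsy input)
def pvNormalizeMac (raw : String) : Option String :=
  if raw = "" then none else some (pvNorm raw)

-- nic.get("ip", {}).get("address","") with the truthiness test on the block
def pvNicIp (nic : List (String × List (String × String))) : String :=
  let blk := PySem.Dict.getD (PySem.Dict.mk nic) "ip" []
  if blk ≠ [] then PySem.Dict.getD (PySem.Dict.mk blk) "address" "" else ""

-- nic.get("mac", {}).get("address", "")
def pvNicMac (nic : List (String × List (String × String))) : String :=
  PySem.Dict.getD (PySem.Dict.mk (PySem.Dict.getD (PySem.Dict.mk nic) "mac" [])) "address" ""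

-- A's for-loop with accumulators mac, ip_address and an early break
def pvParseAux : List (List (String × List (String × String))) → Option String → Option String → Option String × Option String
  | [], mac, ip => (mac, ip)
  | nic :: rest, mac, ip =>
      let nicIp := pvNicIp nic
      let nicMac := pvNicMac nic
      if nicIp ≠ "" ∧ ¬ PySem.Str.startswith nicIp "127." = true then
        ((if nicMac ≠ "" then pvNormalizeMac nicMac else mac), some nicIp)
      else if nicMac ≠ "" ∧ (mac = none ∨ mac = some "") then
        pvParseAux rest (pvNormalizeMac nicMac) ip
      else
        pvParseAux rest mac ip

def parse_host_mac_and_ip (nics : List (List (String × List (String × String)))) : Option String × Option String :=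
  pvParseAux nics none none

-- ===== PORT B =====
-- management-NIC predicate (the generator condition in B's next(...))
def pvIsMgmt (nic : List (String × List (String × String))) : Bool :=
  decide (pvNicIp nic ≠ "") && !(PySem.Str.startswith (pvNicIp nic) "127.")

-- next((n for n in (_norm(_nic_mac(nic)) for nic in candidates) if n), None)
def pvFallbackMac (cands : List (List (String × List (String × String)))) : Option String :=
  (cands.map (fun nic => pvNorm (pvNicMac nic))).find? (fun n => n != "")

def parse_host_mac_and_ip_alt (nics : List (List (String × List (String × String)))) : Option String × Option String :=
  match nics.findIdx? pvIsMgmt with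
  | none => (pvFallbackMac nics, none)
  | some i =>
      let mgmt := nics.getD i []
      let mgmtMac := pvNicMac mgmt
      if mgmtMac ≠ "" then (some (pvNorm mgmtMac), some (pvNicIp mgmt))
      else (pvFallbackMac (nics.take i), some (pvNicIp mgmt))

-- ===== PRECONDITION & SPEC =====
-- separator characters removed by normalize_mac
def pvSep (c : Char) : Bool := c == ':' || c == '-' || c == '.'

-- a management NIC: truthy IP not starting with "127." (the condition of A's break branch, as a predicate for D_)
def pvMgmtNic (nic : List (String × List (String × String))) : Bool :=
  let ip := (pvNicIp nic).toList
  decide (ip ≠ [] ∧ ip.take 4 ≠ "127.".toList)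

-- On inputs where the MAC must come from the fallback NICs (those before the management NIC, or all if there is none) and every fallback MAC address is either empty or consists only of the separator characters ':','-','.', A returns the empty string "" as the MAC (an artefact of its falsy accumulator), while B returns None, the intended 'no MAC found'.
def D_parse_host_mac_and_ip (nics : List (List (String × List (String × String)))) : Prop :=
  let C := nics.takeWhile fun n => !pvMgmtNic n
  ((C.any fun n => pvNicMac n != "")
    && (C.all fun n => (pvNicMac n).toList.all pvSep)
    && ((nics.find? pvMgmtNic).all fun m => pvNicMac m == "")) = true
instance (nics : List (List (String × List (String × String)))) : Decidable (D_parse_host_mac_and_ip nics) := by unfold D_parse_host_mac_and_ip; infer_instance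

def Spec_parse_host_mac_and_ip (nics : List (List (String × List (String × String)))) (out : Option String × Option String) : Prop := ¬ D_parse_host_mac_and_ip nics → out = parse_host_mac_and_ip_alt nics
instance (nics : List (List (String × List (String × String)))) (out : Option String × Option String) : Decidable (Spec_parse_host_mac_and_ip nics out) := by unfold Spec_parse_host_mac_and_ip; infer_instance

def pvDiffWitness_parse_host_mac_and_ip : (List (List (String × List (String × String)))) := [[("mac", [("address", ":")])]]
def pvDiffWitnessOut_parse_host_mac_and_ip : (Option String × Option String) × (Option String × Option String) := ((some "", none), (none, none))

-- ===== CLAIM (what is proved, stated in full; the proofs are below) =====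
def Claim_unchanged_parse_host_mac_and_ip : Prop := ∀ (nics : List (List (String × List (String × String)))), Dom_parse_host_mac_and_ip nics → Spec_parse_host_mac_and_ip nics (parse_host_mac_and_ip nics)
def Claim_changed_parse_host_mac_and_ip : Prop := Dom_parse_host_mac_and_ip (pvDiffWitness_parse_host_mac_and_ip) ∧ D_parse_host_mac_and_ip (pvDiffWitness_parse_host_mac_and_ip) ∧ parse_host_mac_and_ip (pvDiffWitness_parse_host_mac_and_ip) = pvDiffWitnessOut_parse_host_mac_and_ip.1 ∧ parse_host_mac_and_ip_alt (pvDiffWitness_parse_host_mac_and_ip) = pvDiffWitnessOut_parse_host_mac_and_ip.2 ∧ pvDiffWitnessOut_parse_host_mac_and_ip.1 ≠ pvDiffWitnessOut_parse_host_mac_and_ip.2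
def Claim_exact_parse_host_mac_and_ip : Prop := ∀ (nics : List (List (String × List (String × String)))), Dom_parse_host_mac_and_ip nics → D_parse_host_mac_and_ip nics → parse_host_mac_and_ip nics ≠ parse_host_mac_and_ip_alt nics

-- ===== LEMMAS AND PROOFS =====

-- Chars.replace with a single-character pattern and empty replacement is a filter
-- proof-side restatement of D_'s fallback-NIC stretch
def pvCandidates (nics : List (List (String × List (String × String)))) : List (List (String × List (String × String))) :=
  match nics.findIdx? pvMgmtNic with
  | none => nics
  | some i => if pvNicMac (nics.getD i []) ≠ "" then [] else nics.take i

lemma pvTakeWhile_eq (p : List (String × List (String × String)) → Bool) :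
    ∀ (l : List (List (String × List (String × String)))),
      l.takeWhile (fun x => !p x) = (match l.findIdx? p with | none => l | some i => l.take i) := by
  intro l
  induction l with
  | nil => simp
  | cons x t ih =>
      rw [List.findIdx?_cons]
      by_cases hp : p x = true
      · simp [hp]
      · simp only [List.takeWhile_cons, hp, Bool.not_false, if_true, if_false, Bool.false_eq_true]
        rw [ih]
        cases h : t.findIdx? p <;> simp

lemma pvFind?_of_findIdx? (p : List (String × List (String × String)) → Bool) :
    ∀ (l : List (List (String × List (String × String)))) (i : Nat), l.findIdx? p = some i →
      ∃ m, l[i]? = some m ∧ l.find? p = some m ∧ p m = true := by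
  intro l
  induction l with
  | nil => simp
  | cons x t ih =>
      intro i h
      rw [List.findIdx?_cons] at h
      by_cases hp : p x = true
      · rw [if_pos hp] at h
        obtain rfl : i = 0 := by simpa using h.symm
        exact ⟨x, rfl, by simp [hp], hp⟩
      · rw [if_neg hp] at h
        obtain ⟨j, hj, rfl⟩ : ∃ j, t.findIdx? p = some j ∧ i = j + 1 := by
          cases hf : t.findIdx? p <;> rw [hf] at h <;> simp_all
        obtain ⟨m, hm, hfind, hpm⟩ := ih j hj
        exact ⟨m, by simpa using hm, by simp [hp, hfind], hpm⟩

lemma pvD_char (nics : List (List (String × List (String × String)))) :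
    D_parse_host_mac_and_ip nics ↔
      ((pvCandidates nics).any (fun nic => pvNicMac nic != "")
        && (pvCandidates nics).all (fun nic => (pvNicMac nic).toList.all pvSep)) = true := by
  unfold D_parse_host_mac_and_ip pvCandidates
  rw [pvTakeWhile_eq pvMgmtNic nics]
  cases h : nics.findIdx? pvMgmtNic with
  | none =>
      have hf : nics.find? pvMgmtNic = none := by
        rw [List.find?_eq_none]
        intro x hx
        have := List.findIdx?_eq_none_iff.mp h x hx
        simp [this]
      simp [hf]
  | some i =>
      obtain ⟨m, hm, hfind, _⟩ := pvFind?_of_findIdx? pvMgmtNic nics i h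
      have hgetD : nics.getD i [] = m := by simp [List.getD, hm]
      simp only [hfind, hgetD]
      by_cases hmac : pvNicMac m = "" <;> simp [hmac]

lemma pvMgmtNic_eq_isMgmt : pvMgmtNic = pvIsMgmt := by
  funext nic
  have h1 : (pvNicIp nic ≠ "") ↔ (pvNicIp nic).toList ≠ [] := by
    constructor
    · intro h hnil
      exact h (String.ext (by simpa using hnil))
    · intro h hs
      exact h (by rw [hs]; rfl)
  have h2 : PySem.Str.startswith (pvNicIp nic) "127." = true ↔
      ((pvNicIp nic).toList.take 4 = ['1', '2', '7', '.']) := by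
    rw [PySem.Str.startswith_eq, PySem.Chars.startswith_iff]
    have : ("127." : String).toList = ['1', '2', '7', '.'] := rfl
    rw [this]
    rw [List.prefix_iff_eq_take]
    constructor <;> intro h <;> exact h.symm
  have h2' : PySem.Str.startswith (pvNicIp nic) "127." = false ↔
      ¬ (pvNicIp nic).toList.take 4 = ['1', '2', '7', '.'] := by
    rw [← h2]
    cases PySem.Str.startswith (pvNicIp nic) "127." <;> simp
  simp only [pvMgmtNic, pvIsMgmt]
  rw [Bool.eq_iff_iff]
  simp only [decide_eq_true_eq, Bool.and_eq_true, Bool.not_eq_true']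
  rw [h2', ← h1]
  exact Iff.rfl

lemma pvReplaceGo_single (c : Char) : ∀ (fuel : Nat) (l acc : List Char), l.length ≤ fuel →
    PySem.Chars.replace.go [c] [] fuel l acc = acc.reverse ++ l.filter (fun x => x != c) := by
  intro fuel
  induction fuel with
  | zero =>
      intro l acc h
      have hl : l = [] := List.length_eq_zero_iff.mp (Nat.le_zero.mp h)
      subst hl
      simp [PySem.Chars.replace.go]
  | succ n ih =>
      intro l acc h
      cases l with
      | nil => simp [PySem.Chars.replace.go]
      | cons x t =>
          rw [PySem.Chars.replace.go]
          by_cases hx : x = c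
          · subst hx
            have hpre : [x].isPrefixOf (x :: t) = true := by simp [List.isPrefixOf]
            rw [if_pos hpre]
            have hlen : t.length ≤ n := by simpa using h
            simp only [List.length_cons, List.length_nil, List.drop_succ_cons, List.drop_zero,
              List.reverse_nil, List.nil_append]
            rw [ih _ _ hlen]
            simp
          · have hpre : [c].isPrefixOf (x :: t) = false := by
              simp [List.isPrefixOf]
              exact fun hc => (hx hc.symm).elim
            rw [if_neg (by simp [hpre])]
            have : t.length ≤ n := by simpa using h
            rw [ih _ _ this]
            simp [hx]

lemma pvReplace_single (c : Char) (l : List Char) :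
    PySem.Chars.replace l [c] [] = l.filter (fun x => x != c) := by
  rw [PySem.Chars.replace]
  simp only [List.isEmpty_cons, Bool.false_eq_true, if_false]
  exact pvReplaceGo_single c l.length l [] le_rfl

-- pvNorm yields the empty string exactly on strings of separator characters
lemma pvNorm_eq_empty_iff (s : String) : pvNorm s = "" ↔ s.toList.all pvSep = true := by
  have h1 : (pvNorm s).toList =
      PySem.Chars.upper (((s.toList.filter (fun x => x != ':')).filter (fun x => x != '-')).filter (fun x => x != '.')) := by
    simp [pvNorm, PySem.Str.upper, PySem.Str.replace, pvReplace_single]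
  constructor
  · intro h
    have : (pvNorm s).toList = [] := by rw [h]; rfl
    rw [h1] at this
    simp only [PySem.Chars.upper, List.map_eq_nil_iff, List.filter_filter,
      List.filter_eq_nil_iff] at this
    simp only [List.all_eq_true]
    intro x hx
    have hh := this x hx
    by_cases e1 : x = ':'
    · simp [pvSep, e1]
    by_cases e2 : x = '-'
    · simp [pvSep, e2]
    by_cases e3 : x = '.'
    · simp [pvSep, e3]
    simp [e1, e2, e3] at hh
  · intro h
    have hnil : (((s.toList.filter (fun x => x != ':')).filter (fun x => x != '-')).filter (fun x => x != '.')) = [] := by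
      simp only [List.filter_filter, List.filter_eq_nil_iff]
      intro x hx
      have hx' := (List.all_eq_true.mp h) x hx
      simp only [pvSep, Bool.or_eq_true, beq_iff_eq] at hx'
      obtain (h' | h') | h' := hx' <;> simp [h']
    apply String.ext
    rw [h1, hnil]
    rfl

-- A's fallback scan, written as A accumulates it: first truthy normalisation, "" if raw macs existed but all normalised empty
def pvAFold (cands : List (List (String × List (String × String)))) : Option String :=
  let norms := ((cands.map pvNicMac).filter (fun m => m != "")).map pvNorm
  match norms.find? (fun n => n != "") with
  | some n => some n
  | none => if norms = [] then none else some ""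

-- how A's mac accumulator combines with the fallback over a stretch of non-management NICs
def pvCombine (mac fb : Option String) : Option String :=
  if mac = none ∨ mac = some "" then (match fb with | none => mac | some v => some v) else mac

lemma pvAFold_nil : pvAFold [] = none := by decide

lemma pvAFold_cons (nic : List (String × List (String × String)))
    (pre : List (List (String × List (String × String)))) :
    pvAFold (nic :: pre) =
      if pvNicMac nic ≠ "" then
        (if pvNorm (pvNicMac nic) ≠ "" then some (pvNorm (pvNicMac nic))
         else match pvAFold pre with | none => some "" | some v => some v)
      else pvAFold pre := by
  by_cases hm : pvNicMac nic = ""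
  · simp [pvAFold, hm]
  · by_cases hn : pvNorm (pvNicMac nic) = ""
    · simp only [pvAFold, List.map_cons, List.filter_cons, hm, hn, if_pos, ne_eq,
        not_false_eq_true, bne_iff_ne, List.find?]
      cases hf : List.find? (fun n => n != "") (List.map pvNorm (List.filter (fun n => n != "") (List.map pvNicMac pre))) with
      | none => simp; split <;> rename_i heq <;> split_ifs at heq <;> simp_all
      | some v => simp
    · simp [pvAFold, hm, hn]

lemma pvCombine_step (nic : List (String × List (String × String)))
    (pre : List (List (String × List (String × String)))) (mac : Option String) :
    pvCombine mac (pvAFold (nic :: pre)) =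
    pvCombine (if pvNicMac nic ≠ "" ∧ (mac = none ∨ mac = some "") then pvNormalizeMac (pvNicMac nic) else mac)
      (pvAFold pre) := by
  rw [pvAFold_cons]
  by_cases hm : pvNicMac nic = ""
  · simp [hm]
  · by_cases hmac : mac = none ∨ mac = some ""
    · by_cases hn : pvNorm (pvNicMac nic) = ""
      · simp only [pvCombine, pvNormalizeMac, hm, hn, hmac, if_false, ne_eq,
          not_false_eq_true, not_true_eq_false, if_pos]
        cases hf : pvAFold pre <;> simp
      · simp [pvCombine, pvNormalizeMac, hm, hn, hmac]
    · simp [pvCombine, hm, hmac]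

-- A's loop, characterised by the management-NIC index
lemma pvParseAux_eq (nics : List (List (String × List (String × String)))) (mac ip : Option String) :
    pvParseAux nics mac ip =
      match nics.findIdx? pvIsMgmt with
      | none => (pvCombine mac (pvAFold nics), ip)
      | some i =>
          (if pvNicMac (nics.getD i []) ≠ "" then some (pvNorm (pvNicMac (nics.getD i [])))
           else pvCombine mac (pvAFold (nics.take i)), some (pvNicIp (nics.getD i []))) := by
  induction nics generalizing mac ip with
  | nil =>
      simp only [pvParseAux, List.findIdx?_nil, pvAFold_nil, pvCombine]
      split_ifs <;> simp
  | cons nic rest ih =>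
      rw [List.findIdx?_cons]
      by_cases hmg : pvIsMgmt nic = true
      · have hcond : pvNicIp nic ≠ "" ∧ ¬ PySem.Str.startswith (pvNicIp nic) "127." = true := by
          simpa [pvIsMgmt] using hmg
        simp only [pvParseAux]
        rw [if_pos hcond]
        simp only [hmg, if_true]
        by_cases hm : pvNicMac nic = "" <;>
          simp [hm, pvNormalizeMac, pvAFold_nil, pvCombine, List.getD]
      · have hcond : ¬ (pvNicIp nic ≠ "" ∧ ¬ PySem.Str.startswith (pvNicIp nic) "127." = true) := by
          simp only [pvIsMgmt, Bool.and_eq_true, decide_eq_true_eq, Bool.not_eq_true',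
            Bool.not_eq_true] at hmg ⊢
          tauto
        simp only [pvParseAux]
        rw [if_neg hcond]
        simp only [hmg, Bool.false_eq_true, if_false]
        by_cases hstep : pvNicMac nic ≠ "" ∧ (mac = none ∨ mac = some "")
        · rw [if_pos hstep, ih]
          cases hfi : rest.findIdx? pvIsMgmt with
          | none =>
              simp only [Option.map_none]
              rw [pvCombine_step, if_pos hstep]
          | some j =>
              simp only [Option.map_some, List.getD, List.getElem?_cons_succ, List.take_succ_cons]
              rw [pvCombine_step, if_pos hstep]
        · rw [if_neg hstep, ih]
          cases hfi : rest.findIdx? pvIsMgmt with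
          | none =>
              simp only [Option.map_none]
              rw [pvCombine_step, if_neg hstep]
          | some j =>
              simp only [Option.map_some, List.getD, List.getElem?_cons_succ, List.take_succ_cons]
              rw [pvCombine_step, if_neg hstep]

lemma pvFallbackMac_cons (nic : List (String × List (String × String)))
    (rest : List (List (String × List (String × String)))) :
    pvFallbackMac (nic :: rest) =
      if pvNorm (pvNicMac nic) ≠ "" then some (pvNorm (pvNicMac nic)) else pvFallbackMac rest := by
  simp only [pvFallbackMac, List.map_cons, List.find?]
  by_cases hn : pvNorm (pvNicMac nic) = ""
  · simp [hn]
  · have hb : (pvNorm (pvNicMac nic) != "") = true := by simp [hn]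
    rw [hb]
    simp [hn]

lemma pvNorm_empty : pvNorm "" = "" := by decide

-- A's fallback vs B's: they agree unless all candidate norms are empty while some raw mac exists
lemma pvAFold_eq (C : List (List (String × List (String × String)))) :
    pvAFold C = match pvFallbackMac C with
      | some n => some n
      | none => if C.any (fun nic => pvNicMac nic != "") then some "" else none := by
  induction C with
  | nil => decide
  | cons nic rest ih =>
      rw [pvAFold_cons, pvFallbackMac_cons]
      by_cases hm : pvNicMac nic = ""
      · simp [hm, pvNorm_empty, ih]
      · by_cases hn : pvNorm (pvNicMac nic) = ""
        · simp only [hm, hn, ne_eq, not_true_eq_false, not_false_eq_true, if_true, if_false,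
            ih, List.any_cons]
          have hb : (pvNicMac nic != "") = true := by simp [hm]
          simp only [hb, Bool.true_or]
          cases hf : pvFallbackMac rest with
          | some v => simp
          | none => simp only; split_ifs <;> simp
        · simp [hm, hn]

lemma pvCombine_none (fb : Option String) : pvCombine none fb = fb := by
  cases fb <;> simp [pvCombine]

-- the key per-stretch comparison: outside D_'s condition on the candidate stretch, the two fallbacks agree
lemma pvFallback_agree (C : List (List (String × List (String × String))))
    (h : ¬ ((C.any (fun nic => pvNicMac nic != "")
          && C.all (fun nic => (pvNicMac nic).toList.all pvSep)) = true)) :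
    pvAFold C = pvFallbackMac C := by
  rw [pvAFold_eq]
  cases hf : pvFallbackMac C with
  | some n => rfl
  | none =>
      simp only
      split_ifs with hany
      · exfalso
        apply h
        simp only [hany, Bool.true_and]
        simp only [List.all_eq_true]
        intro nic hnic
        have hfind := List.find?_eq_none.mp hf (pvNorm (pvNicMac nic))
          (List.mem_map.mpr ⟨nic, hnic, rfl⟩)
        have : pvNorm (pvNicMac nic) = "" := by simpa using hfind
        exact List.all_eq_true.mp ((pvNorm_eq_empty_iff _).mp this)
      · rfl

-- inside D_'s condition the two fallbacks differ: A's gives some "", B's gives none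
lemma pvFallback_differ (C : List (List (String × List (String × String))))
    (h : (C.any (fun nic => pvNicMac nic != "")
          && C.all (fun nic => (pvNicMac nic).toList.all pvSep)) = true) :
    pvAFold C = some "" ∧ pvFallbackMac C = none := by
  obtain ⟨hany, hall⟩ : (C.any fun nic => pvNicMac nic != "") = true ∧
      (C.all fun nic => (pvNicMac nic).toList.all pvSep) = true := by simpa using h
  have hf : pvFallbackMac C = none := by
    apply List.find?_eq_none.mpr
    intro n hn
    rcases List.mem_map.mp hn with ⟨nic, hnic, rfl⟩
    have := (List.all_eq_true.mp hall) nic hnic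
    have : pvNorm (pvNicMac nic) = "" := (pvNorm_eq_empty_iff _).mpr this
    simp [this]
  refine ⟨?_, hf⟩
  rw [pvAFold_eq, hf]
  simp [hany]

-- ===== VERDICT (by name: the statements are the Claim_ definitions above) =====
theorem parse_host_mac_and_ip_spec : Claim_unchanged_parse_host_mac_and_ip := by
  intro nics _ hD
  unfold parse_host_mac_and_ip parse_host_mac_and_ip_alt
  rw [pvD_char] at hD
  unfold pvCandidates at hD
  rw [pvMgmtNic_eq_isMgmt] at hD
  rw [pvParseAux_eq]
  cases h : nics.findIdx? pvIsMgmt with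
  | none =>
      rw [h] at hD
      simp only [pvCombine_none]
      rw [pvFallback_agree nics hD]
  | some i =>
      rw [h] at hD
      simp only [List.getD] at hD ⊢
      by_cases hm : pvNicMac (nics[i]?.getD []) = ""
      · simp only [hm, ne_eq, not_true_eq_false, if_false] at hD ⊢
        simp only [pvCombine_none]
        rw [pvFallback_agree _ hD]
      · simp [hm]

theorem parse_host_mac_and_ip_changed : Claim_changed_parse_host_mac_and_ip := by
  unfold Claim_changed_parse_host_mac_and_ip; decide

theorem parse_host_mac_and_ip_tight : Claim_exact_parse_host_mac_and_ip := by
  intro nics _ hD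
  unfold parse_host_mac_and_ip parse_host_mac_and_ip_alt
  rw [pvD_char] at hD
  unfold pvCandidates at hD
  rw [pvMgmtNic_eq_isMgmt] at hD
  rw [pvParseAux_eq]
  cases h : nics.findIdx? pvIsMgmt with
  | none =>
      rw [h] at hD
      rcases pvFallback_differ nics hD with ⟨hA, hB⟩
      simp only [pvCombine_none, hA, hB]
      simp
  | some i =>
      rw [h] at hD
      simp only [List.getD] at hD ⊢
      by_cases hm : pvNicMac (nics[i]?.getD []) = ""
      · simp only [hm, ne_eq, not_true_eq_false, if_false] at hD ⊢
        rcases pvFallback_differ _ hD with ⟨hA, hB⟩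
        simp only [pvCombine_none, hA, hB]
        simp
      · simp only [hm, ne_eq, not_false_eq_true, if_true] at hD
        simp at hD
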